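-- pv_equiv track=rewrite | github.com/abdelaziz2642004/alignerrr-tasks-zev | A/src/zev/command_validator.py | _extract_unquoted_words
-- ===== SOURCE A (Python) =====
-- def _extract_unquoted_words(command: str) -> list[str]:
--     """Extract words from command that are not inside quotes."""
--     words = []
--     current_word: list[str] = []
--     in_single_quote = False
--     in_double_quote = False
--     escaped = False
--
--     for char in command:
--         if escaped:
--             escaped = False
--             if not in_single_quote and not in_double_quote:
--                 current_word.append(char)
--             continue
--
--         if char == "\\" and not in_single_quote:
--             escaped = True
--             continue
--
--         if char == "'" and not in_double_quote:
--             in_single_quote = not in_single_quote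
--             continue
--
--         if char == '"' and not in_single_quote:
--             in_double_quote = not in_double_quote
--             continue
--
--         if in_single_quote or in_double_quote:
--             continue
--
--         if char.isspace() or char in ";|&<>(){}":
--             if current_word:
--                 words.append("".join(current_word))
--                 current_word = []
--         else:
--             current_word.append(char)
--
--     if current_word:
--         words.append("".join(current_word))
--
--     return words
-- ===== SOURCE B (Python) =====
-- def _extract_unquoted_words(command: str) -> list[str]:
--     """Extract words from command that are not inside quotes."""
--     # Recursive-descent style index scanner: quoted regions are jumped over by
--     # dedicated helpers, each word is consumed by one sub-scanner call.
--     words = []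
--     i, n = 0, len(command)
--     while i < n:
--         c = command[i]
--         if c.isspace() or c in ";|&<>(){}":
--             i += 1
--         else:
--             i, word = _read_word(command, i)
--             if word:
--                 words.append(word)
--     return words
--
--
-- def _read_word(command, i):
--     """Consume one word starting at i; return (index after it, the word)."""
--     n = len(command)
--     chars = []
--     while i < n:
--         c = command[i]
--         if c == "\\":
--             if i + 1 < n:
--                 chars.append(command[i + 1])
--             i += 2
--         elif c == "'":
--             i = _skip_single(command, i + 1)
--         elif c == '"':
--             i = _skip_double(command, i + 1)
--         elif c.isspace() or c in ";|&<>(){}":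
--             break
--         else:
--             chars.append(c)
--             i += 1
--     return i, "".join(chars)
--
--
-- def _skip_single(command, i):
--     j = command.find("'", i)
--     return len(command) if j < 0 else j + 1
--
--
-- def _skip_double(command, i):
--     n = len(command)
--     while i < n:
--         c = command[i]
--         if c == "\\":
--             i += 2
--         elif c == '"':
--             return i + 1
--         else:
--             i += 1
--     return i
-- ===== Notes on version B (the rewrite author's own statement) =====
-- stated objective: alternative
-- what changed: A's single char-by-char loop with in_single/in_double/escaped boolean flags and a current_word buffer is replaced by a recursive-descent index scanner: the top loop only skips separators, each word is consumed by a dedicated sub-scanner, and quoted regions are jumped over by per-quote-kind skip helpers (single quotes via str.find), so no quote-state flags are carried through the scan.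
import Mathlib
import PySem

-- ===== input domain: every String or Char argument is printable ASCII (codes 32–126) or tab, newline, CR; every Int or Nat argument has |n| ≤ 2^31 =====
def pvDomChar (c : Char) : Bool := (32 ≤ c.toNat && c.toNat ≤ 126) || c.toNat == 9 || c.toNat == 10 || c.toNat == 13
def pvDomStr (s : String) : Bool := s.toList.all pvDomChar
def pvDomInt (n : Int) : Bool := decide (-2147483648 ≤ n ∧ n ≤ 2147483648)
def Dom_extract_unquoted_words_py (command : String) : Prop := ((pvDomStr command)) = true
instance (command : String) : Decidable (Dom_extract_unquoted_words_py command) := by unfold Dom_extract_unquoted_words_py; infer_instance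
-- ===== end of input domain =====

-- B replaces A's boolean-flag state machine by a recursive-descent index scanner: quoted regions are
-- jumped over by dedicated skip helpers and each word is consumed by one sub-scanner call
-- (objective: alternative decomposition; same O(n) cost).

-- shared char-class: `char.isspace() or char in ";|&<>(){}"` (the identical expression in both sources)
def pvIsSep (c : Char) : Bool := PySem.Chars.isspace c || (";|&<>(){}".toList.contains c)

-- ===== PORT A =====
def pvALoop : List String → List Char → Bool → Bool → Bool → List Char → List String
  | words, cur, _, _, _, [] => if cur.isEmpty then words else words ++ [String.ofList cur]
  | words, cur, s, d, e, ch :: rest =>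
    if e then pvALoop words (if !s && !d then cur ++ [ch] else cur) s d false rest
    else if ch == '\\' && !s then pvALoop words cur s d true rest
    else if ch == '\'' && !d then pvALoop words cur (!s) d e rest
    else if ch == '"' && !s then pvALoop words cur s (!d) e rest
    else if s || d then pvALoop words cur s d e rest
    else if pvIsSep ch then
      (if cur.isEmpty then pvALoop words [] s d e rest
       else pvALoop (words ++ [String.ofList cur]) [] s d e rest)
    else pvALoop words (cur ++ [ch]) s d e rest


def extract_unquoted_words_py (command : String) : List String :=
  pvALoop [] [] false false false command.toList

-- ===== PORT B =====
-- The Python helpers walk a monotone index i through `command`; they are transcribed on the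
-- remaining suffix command[i:] (exact: every step moves i forward).  The *_len and pvRW_* / pvSkipD_*
-- lemmas between the definitions are cited by the ports' decreasing_by clauses (termination only).

def pvSkipS : List Char → List Char
  | [] => []
  | c :: rest => if c == '\'' then rest else pvSkipS rest

def pvSkipD : List Char → List Char
  | [] => []
  | c :: rest =>
    if c == '\\' then pvSkipD (rest.drop 1)
    else if c == '"' then rest else pvSkipD rest
termination_by l => l.length
decreasing_by all_goals (simp; try omega)

lemma pvSkipS_len (l : List Char) : (pvSkipS l).length ≤ l.length := by
  induction l with
  | nil => simp [pvSkipS]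
  | cons c rest ih => simp only [pvSkipS]; split; · simp
                      · simp only [List.length_cons]; omega

lemma pvSkipD_nil : pvSkipD [] = [] := by rw [pvSkipD]
lemma pvSkipD_bs (rest : List Char) : pvSkipD ('\\' :: rest) = pvSkipD (rest.drop 1) := by
  rw [pvSkipD]; simp
lemma pvSkipD_dq (rest : List Char) : pvSkipD ('"' :: rest) = rest := by rw [pvSkipD]; simp
lemma pvSkipD_other (c : Char) (rest : List Char) (h1 : c ≠ '\\') (h2 : c ≠ '"') :
    pvSkipD (c :: rest) = pvSkipD rest := by rw [pvSkipD]; simp [h1, h2]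

lemma pvSkipD_len (l : List Char) : (pvSkipD l).length ≤ l.length := by
  induction l using pvSkipD.induct with
  | case1 => simp [pvSkipD_nil]
  | case2 c rest h ih =>
      have hc : c = '\\' := by simpa using h
      subst hc; rw [pvSkipD_bs]
      have h2 : (rest.drop 1).length ≤ rest.length := by simp
      simp only [List.length_cons]; omega
  | case3 c rest h1 h2 =>
      have hc : c = '"' := by simpa using h2
      subst hc; rw [pvSkipD_dq]; simp
  | case4 c rest h1 h2 ih =>
      rw [pvSkipD_other c rest (by simpa using h1) (by simpa using h2)]
      simp only [List.length_cons]; omega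

def pvReadWord : List Char → List Char × List Char
  | [] => ([], [])
  | c :: rest =>
    if c == '\\' then
      match rest with
      | [] => ([], [])
      | c2 :: rest2 => let p := pvReadWord rest2; (p.1, c2 :: p.2)
    else if c == '\'' then pvReadWord (pvSkipS rest)
    else if c == '"' then pvReadWord (pvSkipD rest)
    else if pvIsSep c then (c :: rest, [])
    else let p := pvReadWord rest; (p.1, c :: p.2)
termination_by l => l.length
decreasing_by
  · simp
  · have := pvSkipS_len rest; simp; omega
  · have := pvSkipD_len rest; simp; omega
  · simp

lemma pvRW_nil : pvReadWord [] = ([], []) := by rw [pvReadWord.eq_def]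
lemma pvRW_bs_nil : pvReadWord ['\\'] = ([], []) := by rw [pvReadWord.eq_def]; simp
lemma pvRW_bs_cons (c2 : Char) (rest2 : List Char) :
    pvReadWord ('\\' :: c2 :: rest2) = ((pvReadWord rest2).1, c2 :: (pvReadWord rest2).2) := by
  rw [pvReadWord.eq_def]; simp
lemma pvRW_sq (rest : List Char) : pvReadWord ('\'' :: rest) = pvReadWord (pvSkipS rest) := by
  rw [pvReadWord.eq_def]; simp
lemma pvRW_dq (rest : List Char) : pvReadWord ('"' :: rest) = pvReadWord (pvSkipD rest) := by
  rw [pvReadWord.eq_def]; simp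
lemma pvRW_other (c : Char) (rest : List Char) (h1 : c ≠ '\\') (h2 : c ≠ '\'') (h3 : c ≠ '"') :
    pvReadWord (c :: rest) =
      if pvIsSep c then (c :: rest, [])
      else ((pvReadWord rest).1, c :: (pvReadWord rest).2) := by
  rw [pvReadWord.eq_def]; simp [h1, h2, h3]

lemma pvReadWord_len : ∀ (n : Nat) (l : List Char), l.length ≤ n → (pvReadWord l).1.length ≤ l.length := by
  intro n
  induction n with
  | zero => intro l hl; interval_cases h : l.length; · rw [List.length_eq_zero_iff] at h; subst h; simp [pvRW_nil]
  | succ n ih =>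
    intro l hl
    match l with
    | [] => simp [pvRW_nil]
    | c :: rest =>
      simp only [List.length_cons] at hl
      by_cases hbs : c = '\\'
      · subst hbs
        match rest with
        | [] => simp [pvRW_bs_nil]
        | c2 :: rest2 =>
          rw [pvRW_bs_cons]
          have := ih rest2 (by simp at hl ⊢; omega)
          simp only [List.length_cons] at *; omega
      · by_cases hsq : c = '\''
        · subst hsq; rw [pvRW_sq]
          have h1 := pvSkipS_len rest
          have := ih (pvSkipS rest) (by omega)
          simp only [List.length_cons]; omega
        · by_cases hdq : c = '"'
          · subst hdq; rw [pvRW_dq]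
            have h1 := pvSkipD_len rest
            have := ih (pvSkipD rest) (by omega)
            simp only [List.length_cons]; omega
          · rw [pvRW_other c rest hbs hsq hdq]
            split
            · simp
            · have := ih rest (by omega)
              simp only [List.length_cons]; omega

lemma pvReadWord_len' (l : List Char) : (pvReadWord l).1.length ≤ l.length :=
  pvReadWord_len l.length l le_rfl

def pvBTop : List Char → List String
  | [] => []
  | c :: rest =>
    if pvIsSep c then pvBTop rest
    else
      let p := pvReadWord (c :: rest)
      (if p.2.isEmpty then [] else [String.ofList p.2]) ++ pvBTop p.1
termination_by l => l.length
decreasing_by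
  · simp
  · rename_i hsep
    have hle : (pvReadWord (c :: rest)).1.length ≤ rest.length := by
      by_cases hbs : c = '\\'
      · subst hbs
        match rest with
        | [] => simp [pvRW_bs_nil]
        | c2 :: rest2 =>
          rw [pvRW_bs_cons]
          have := pvReadWord_len' rest2
          simp only [List.length_cons]; omega
      · by_cases hsq : c = '\''
        · subst hsq; rw [pvRW_sq]
          have := pvReadWord_len' (pvSkipS rest); have := pvSkipS_len rest; omega
        · by_cases hdq : c = '"'
          · subst hdq; rw [pvRW_dq]
            have := pvReadWord_len' (pvSkipD rest); have := pvSkipD_len rest; omega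
          · rw [pvRW_other c rest hbs hsq hdq, if_neg (by simpa using hsep)]
            exact pvReadWord_len' rest
    simp only [List.length_cons]; omega

def extract_unquoted_words_py_alt (command : String) : List String :=
  pvBTop command.toList

-- ===== PRECONDITION & SPEC =====
def Spec_extract_unquoted_words_py (command : String) (out : List String) : Prop := out = extract_unquoted_words_py_alt command
instance (command : String) (out : List String) : Decidable (Spec_extract_unquoted_words_py command out) := by unfold Spec_extract_unquoted_words_py; infer_instance

-- ===== CLAIM (what is proved, stated in full; the proofs are below) =====
def Claim_equal_extract_unquoted_words_py : Prop := ∀ (command : String), Dom_extract_unquoted_words_py command → Spec_extract_unquoted_words_py command (extract_unquoted_words_py command)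

-- ===== LEMMAS AND PROOFS =====

lemma pvBTop_nil : pvBTop [] = [] := by rw [pvBTop]
lemma pvBTop_sep (c : Char) (rest : List Char) (h : pvIsSep c = true) :
    pvBTop (c :: rest) = pvBTop rest := by rw [pvBTop.eq_def]; simp [h]
lemma pvBTop_word (c : Char) (rest : List Char) (h : pvIsSep c = false) :
    pvBTop (c :: rest) =
      (if (pvReadWord (c :: rest)).2.isEmpty then [] else [String.ofList (pvReadWord (c :: rest)).2])
        ++ pvBTop (pvReadWord (c :: rest)).1 := by
  rw [pvBTop.eq_def]; simp [h]


def pvFlush (cur : List Char) : List String :=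
  if cur.isEmpty then [] else [String.ofList cur]

def pvEmit (cur l : List Char) : List String :=
  pvFlush (cur ++ (pvReadWord l).2) ++ pvBTop (pvReadWord l).1

lemma pvSep_chars {c : Char} (h : pvIsSep c = true) : c ≠ '\\' ∧ c ≠ '\'' ∧ c ≠ '"' := by
  refine ⟨?_, ?_, ?_⟩ <;> rintro rfl <;> exact absurd h (by decide)

lemma pvEmit_nil_eq_top (l : List Char) : pvEmit [] l = pvBTop l := by
  match l with
  | [] => simp [pvEmit, pvRW_nil, pvFlush, pvBTop_nil]
  | c :: rest =>
    by_cases hsep : pvIsSep c = true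
    · obtain ⟨h1, h2, h3⟩ := pvSep_chars hsep
      simp [pvEmit, pvRW_other c rest h1 h2 h3, hsep, pvFlush]
    · rw [pvBTop_word c rest (by simpa using hsep)]
      simp [pvEmit, pvFlush]

lemma pvA_single (l : List Char) : ∀ words cur,
    pvALoop words cur true false false l = pvALoop words cur false false false (pvSkipS l) := by
  induction l with
  | nil => intro words cur; simp [pvALoop, pvSkipS]
  | cons c rest ih =>
    intro words cur
    by_cases h : c = '\'' <;> simp [pvALoop, pvSkipS, h, ih]

lemma pvA_double : ∀ (n : Nat) (l : List Char), l.length ≤ n → ∀ words cur,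
    pvALoop words cur false true false l = pvALoop words cur false false false (pvSkipD l) := by
  intro n
  induction n with
  | zero =>
    intro l hl words cur
    have : l = [] := by rw [← List.length_eq_zero_iff]; omega
    subst this; simp [pvALoop, pvSkipD_nil]
  | succ n ih =>
    intro l hl words cur
    match l with
    | [] => simp [pvALoop, pvSkipD_nil]
    | c :: rest =>
      simp only [List.length_cons] at hl
      by_cases hbs : c = '\\'
      · subst hbs
        rw [pvSkipD_bs]
        match rest with
        | [] => simp [pvALoop, pvSkipD_nil]
        | c2 :: rest2 =>
          have := ih rest2 (by simp at hl ⊢; omega) words cur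
          simp [pvALoop, this]
      · by_cases hdq : c = '"'
        · subst hdq; simp [pvALoop, pvSkipD_dq]
        · rw [pvSkipD_other c rest hbs hdq]
          have := ih rest (by omega) words cur
          simp [pvALoop, hbs, hdq, this]

lemma pvA_emit : ∀ (n : Nat) (l : List Char), l.length ≤ n → ∀ (words : List String) (cur : List Char),
    pvALoop words cur false false false l = words ++ pvEmit cur l := by
  intro n
  induction n with
  | zero =>
    intro l hl words cur
    have : l = [] := by rw [← List.length_eq_zero_iff]; omega
    subst this
    simp only [pvALoop, pvEmit, pvRW_nil, pvBTop_nil, pvFlush]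
    split <;> simp_all [List.isEmpty_iff]
  | succ n ih =>
    intro l hl words cur
    match l with
    | [] =>
      simp only [pvALoop, pvEmit, pvRW_nil, pvBTop_nil, pvFlush]
      split <;> simp_all [List.isEmpty_iff]
    | c :: rest =>
      simp only [List.length_cons] at hl
      by_cases hbs : c = '\\'
      · subst hbs
        match rest with
        | [] =>
          have h2 : pvALoop words cur false false false ['\\'] =
              pvALoop words cur false false true [] := by simp [pvALoop]
          rw [h2]
          simp only [pvALoop, pvEmit, pvRW_bs_nil, pvBTop_nil, pvFlush]
          split <;> simp_all [List.isEmpty_iff]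
        | c2 :: rest2 =>
          have := ih rest2 (by simp at hl ⊢; omega) words (cur ++ [c2])
          simp [pvALoop, this, pvEmit, pvRW_bs_cons]
      · by_cases hsq : c = '\''
        · subst hsq
          have h1 := pvSkipS_len rest
          have := ih (pvSkipS rest) (by omega) words cur
          simp only [pvALoop] at *
          simp only [pvEmit, pvRW_sq]
          rw [show (('\'' == '\\' && !false)) = false by decide]
          simp only [Bool.false_eq_true, if_false]
          rw [show (('\'' == '\'' && !false)) = true by decide]
          simp only [if_true, Bool.not_false]
          rw [pvA_single rest words cur, this]; simp [pvEmit]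
        · by_cases hdq : c = '"'
          · subst hdq
            have h1 := pvSkipD_len rest
            have := ih (pvSkipD rest) (by omega) words cur
            simp only [pvEmit, pvRW_dq]
            simp only [pvALoop]
            rw [show (('"' == '\\' && !false)) = false by decide,
                show (('"' == '\'' && !false)) = false by decide,
                show (('"' == '"' && !false)) = true by decide]
            simp only [Bool.false_eq_true, if_false, if_true, Bool.not_false, Bool.or_self]
            rw [pvA_double (rest.length) rest le_rfl words cur, this]; simp [pvEmit]
          · by_cases hsep : pvIsSep c = true
            · have hrest := ih rest (by omega)
              have hA : pvALoop words cur false false false (c :: rest) =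
                  (if cur.isEmpty then pvALoop words [] false false false rest
                   else pvALoop (words ++ [String.ofList cur]) [] false false false rest) := by
                simp [pvALoop, hbs, hsq, hdq, hsep]
              have hR : pvEmit cur (c :: rest) = pvFlush cur ++ pvBTop rest := by
                simp [pvEmit, pvRW_other c rest hbs hsq hdq, hsep, pvBTop_sep c rest hsep]
              rw [hA, hR]
              by_cases hcur : cur.isEmpty
              · rw [if_pos hcur, hrest words [], pvEmit_nil_eq_top]
                simp_all [pvFlush, List.isEmpty_iff]
              · rw [if_neg hcur, hrest _ [], pvEmit_nil_eq_top]
                simp_all [pvFlush, List.isEmpty_iff]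
            · have hsep' : pvIsSep c = false := by simpa using hsep
              have := ih rest (by omega) words (cur ++ [c])
              have hR : pvEmit cur (c :: rest) = pvEmit (cur ++ [c]) rest := by
                simp [pvEmit, pvRW_other c rest hbs hsq hdq, hsep']
              rw [hR]
              simp [pvALoop, hbs, hsq, hdq, hsep', this]

-- ===== VERDICT (by name: the statement is the Claim_ definition above) =====
theorem extract_unquoted_words_py_spec : Claim_equal_extract_unquoted_words_py := by
  intro command _
  unfold Spec_extract_unquoted_words_py extract_unquoted_words_py extract_unquoted_words_py_alt
  rw [pvA_emit command.toList.length command.toList le_rfl [] [], pvEmit_nil_eq_top]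
  simp
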